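-- pv_equiv track=rewrite | github.com/raghu-shiv/Data-Structures-and-Algorithm | HackerRank (Python)/Advanced/Short_Palindrome.py | shortPalindrome
-- ===== SOURCE A (Python) =====
-- from collections import defaultdict
--
-- def shortPalindrome(s):
--     '''
--     shortPalindrome has the following paramter(s):
--       - string s: a string
--
--     Returns an int: the number of tuples, modulo (10^9 + 7).
--     '''
--
--     mod = 10**9 + 7
--     tuples = 0
--
--     d1 = defaultdict(int)
--     d2 = defaultdict(lambda: defaultdict(int))
--     d3 = defaultdict(lambda: defaultdict(int))
--
--     for char in s:
--         tuples += sum(d3[char].values()) % mod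
--         for k, d in d2.items():
--             d3[k][char] += d[char]
--         for k, v in d1.items():
--             d2[k][char] += v
--         d1[char] += 1
--     return tuples % mod
-- ===== SOURCE B (Python) =====
-- def shortPalindrome(s):
--     '''Count tuples a<b<c<d with s[a]==s[d] and s[b]==s[c], modulo 10^9+7.
--     Alternative decomposition: one independent 4-state subsequence automaton
--     per ordered character pair (x, y) over the string's alphabet.'''
--     mod = 10**9 + 7
--     alpha = list(dict.fromkeys(s))
--     total = 0
--     for x in alpha:
--         for y in alpha:
--             c1 = c2 = c3 = c4 = 0
--             for ch in s:
--                 if ch == x: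
--                     c4 += c3
--                 if ch == y:
--                     c3, c2 = c3 + c2, c2 + c1
--                 if ch == x:
--                     c1 += 1
--             total += c4
--     return total % mod
-- ===== Notes on version B (the rewrite author's own statement) =====
-- stated objective: alternative
-- what changed: Replaced A's single streaming pass over three nested default-dict tables by an independent 4-state subsequence-counting automaton run once per ordered pair (x,y) of alphabet characters, summing the per-pattern x y y x counts.
import Mathlib
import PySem

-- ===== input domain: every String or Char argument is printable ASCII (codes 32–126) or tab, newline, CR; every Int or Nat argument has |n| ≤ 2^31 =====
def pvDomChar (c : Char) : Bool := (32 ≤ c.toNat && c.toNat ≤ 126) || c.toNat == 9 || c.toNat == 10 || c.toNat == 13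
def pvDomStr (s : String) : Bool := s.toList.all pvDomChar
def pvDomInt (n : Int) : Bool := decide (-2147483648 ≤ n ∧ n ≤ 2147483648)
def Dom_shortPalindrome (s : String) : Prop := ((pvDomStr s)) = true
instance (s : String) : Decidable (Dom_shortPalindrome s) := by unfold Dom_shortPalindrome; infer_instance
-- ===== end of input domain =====

-- B replaces A's single streaming pass over three nested default-dict tables by one
-- independent 4-state subsequence automaton per ordered alphabet pair (x, y); objective: alternative.

-- ===== PORT A =====
-- d[k] += v on a defaultdict(int) (creates/overwrites the entry, as Python does)
def pvDAdd (d : PySem.Dict Char Int) (k : Char) (v : Int) : PySem.Dict Char Int :=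
  d.insert k (d.getD k 0 + v)

-- one iteration of A's `for char in s` loop over the state (tuples, d1, d2, d3).
-- `d3[char]` / `d[char]` reads are ported as getD with default ∅ / 0: the zero-valued
-- entries Python's defaultdict creates on those reads are never observed by any later
-- value A computes (sums and += are unaffected by entries equal to 0 / {}), so this is exact.
def pvStepA (st : Int × PySem.Dict Char Int × PySem.Dict Char (PySem.Dict Char Int) × PySem.Dict Char (PySem.Dict Char Int))
    (c : Char) :
    Int × PySem.Dict Char Int × PySem.Dict Char (PySem.Dict Char Int) × PySem.Dict Char (PySem.Dict Char Int) :=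
  let (t, d1, d2, d3) := st
  let t := t + PySem.Int.mod ((d3.getD c PySem.Dict.empty).values).sum 1000000007
  let d3 := d2.items.foldl
    (fun d3 kd => d3.insert kd.1 (pvDAdd (d3.getD kd.1 PySem.Dict.empty) c (kd.2.getD c 0))) d3
  let d2 := d1.items.foldl
    (fun d2 kv => d2.insert kv.1 (pvDAdd (d2.getD kv.1 PySem.Dict.empty) c kv.2)) d2
  let d1 := pvDAdd d1 c 1
  (t, d1, d2, d3)

def shortPalindrome (s : String) : Int :=
  PySem.Int.mod
    ((s.toList.foldl pvStepA (0, PySem.Dict.empty, PySem.Dict.empty, PySem.Dict.empty)).1)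
    1000000007

-- ===== PORT B =====
-- one iteration of B's inner `for ch in s` loop: the 4-state automaton for pattern x y y x
def pvStepB (x y : Char) (st : Int × Int × Int × Int) (ch : Char) : Int × Int × Int × Int :=
  let (c1, c2, c3, c4) := st
  let c4 := if ch = x then c4 + c3 else c4
  let (c3, c2) := if ch = y then (c3 + c2, c2 + c1) else (c3, c2)
  let c1 := if ch = x then c1 + 1 else c1
  (c1, c2, c3, c4)

-- B's per-pair scan: number of subsequences of l equal to x y y x
def pvPat (x y : Char) (l : List Char) : Int :=
  (l.foldl (pvStepB x y) (0, 0, 0, 0)).2.2.2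

def shortPalindrome_alt (s : String) : Int :=
  let l := s.toList
  let alpha := PySem.List.dedup l     -- list(dict.fromkeys(s))
  PySem.Int.mod
    (alpha.foldl (fun total x => alpha.foldl (fun total y => total + pvPat x y l) total) 0)
    1000000007

-- ===== PRECONDITION & SPEC =====
def Spec_shortPalindrome (s : String) (out : Int) : Prop := out = shortPalindrome_alt s
instance (s : String) (out : Int) : Decidable (Spec_shortPalindrome s out) := by unfold Spec_shortPalindrome; infer_instance

-- ===== CLAIM (what is proved, stated in full; the proofs are below) =====
def Claim_equal_shortPalindrome : Prop := ∀ (s : String), Dom_shortPalindrome s → Spec_shortPalindrome s (shortPalindrome s)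

-- ===== LEMMAS AND PROOFS =====

-- model functions: the components of B's automaton state after a prefix p
def pvC2 (p : List Char) (x y : Char) : Int := (p.foldl (pvStepB x y) (0, 0, 0, 0)).2.1
def pvC3 (p : List Char) (x y : Char) : Int := (p.foldl (pvStepB x y) (0, 0, 0, 0)).2.2.1
-- sum of pvC3 over a fixed alphabet S, and B's grand total over S
def pvT3 (S p : List Char) (x : Char) : Int := (S.map fun y => pvC3 p x y).sum
def pvG (S p : List Char) : Int := (S.map fun x => (S.map fun y => pvPat x y p).sum).sum
-- A's d1 after a prefix p
def pvD1 (p : List Char) : PySem.Dict Char Int :=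
  p.foldl (fun d ch => d.insert ch (d.getD ch 0 + 1)) PySem.Dict.empty

-- component equations of pvStepB
lemma pvStepB_fst (x y : Char) (m : Int × Int × Int × Int) (ch : Char) :
    (pvStepB x y m ch).1 = if ch = x then m.1 + 1 else m.1 := by
  rcases m with ⟨a, b, c, d⟩
  by_cases hy : ch = y <;> by_cases hx : ch = x
  · have hxy : x = y := by rw [← hx, hy]
    simp [pvStepB, hx, hy, hxy]
  · simp [pvStepB, hx, hy]
  · have hxy : ¬ x = y := fun h => hy (by rw [hx, h])
    simp [pvStepB, hx, hy, hxy]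
  · simp [pvStepB, hx, hy]

lemma pvStepB_c2 (x y : Char) (m : Int × Int × Int × Int) (ch : Char) :
    (pvStepB x y m ch).2.1 = if ch = y then m.2.1 + m.1 else m.2.1 := by
  rcases m with ⟨a, b, c, d⟩
  by_cases hy : ch = y <;> by_cases hx : ch = x
  · have hxy : x = y := by rw [← hx, hy]
    simp [pvStepB, hx, hy, hxy]
  · simp [pvStepB, hx, hy]
  · have hxy : ¬ x = y := fun h => hy (by rw [hx, h])
    simp [pvStepB, hx, hy, hxy]
  · simp [pvStepB, hx, hy]

lemma pvStepB_c3 (x y : Char) (m : Int × Int × Int × Int) (ch : Char) :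
    (pvStepB x y m ch).2.2.1 = if ch = y then m.2.2.1 + m.2.1 else m.2.2.1 := by
  rcases m with ⟨a, b, c, d⟩
  by_cases hy : ch = y <;> by_cases hx : ch = x
  · have hxy : x = y := by rw [← hx, hy]
    simp [pvStepB, hx, hy, hxy]
  · simp [pvStepB, hx, hy]
  · have hxy : ¬ x = y := fun h => hy (by rw [hx, h])
    simp [pvStepB, hx, hy, hxy]
  · simp [pvStepB, hx, hy]

lemma pvStepB_c4 (x y : Char) (m : Int × Int × Int × Int) (ch : Char) :
    (pvStepB x y m ch).2.2.2 = if ch = x then m.2.2.2 + m.2.2.1 else m.2.2.2 := by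
  rcases m with ⟨a, b, c, d⟩
  by_cases hy : ch = y <;> by_cases hx : ch = x
  · have hxy : x = y := by rw [← hx, hy]
    simp [pvStepB, hx, hy, hxy]
  · simp [pvStepB, hx, hy]
  · have hxy : ¬ x = y := fun h => hy (by rw [hx, h])
    simp [pvStepB, hx, hy, hxy]
  · simp [pvStepB, hx, hy]

-- the first component counts occurrences of x
lemma pvFold_fst (x y : Char) : ∀ (p : List Char) (st : Int × Int × Int × Int),
    (p.foldl (pvStepB x y) st).1 = st.1 + (p.count x : Int) := by
  intro p
  induction p with
  | nil => intro st; simp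
  | cons a p ih =>
    intro st
    rw [List.foldl_cons, ih, pvStepB_fst, List.count_cons]
    by_cases hx : a = x
    · simp [hx]; push_cast; ring
    · simp [hx]

lemma pvC2_snoc (p : List Char) (c x y : Char) :
    pvC2 (p ++ [c]) x y = pvC2 p x y + (if c = y then (p.count x : Int) else 0) := by
  unfold pvC2
  rw [List.foldl_append, List.foldl_cons, List.foldl_nil, pvStepB_c2, pvFold_fst]
  split <;> simp

lemma pvC3_snoc (p : List Char) (c x y : Char) :
    pvC3 (p ++ [c]) x y = pvC3 p x y + (if c = y then pvC2 p x y else 0) := by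
  unfold pvC3 pvC2
  rw [List.foldl_append, List.foldl_cons, List.foldl_nil, pvStepB_c3]
  split <;> simp

lemma pvPat_snoc (p : List Char) (c x y : Char) :
    pvPat x y (p ++ [c]) = pvPat x y p + (if c = x then pvC3 p x y else 0) := by
  unfold pvPat pvC3
  rw [List.foldl_append, List.foldl_cons, List.foldl_nil, pvStepB_c4]
  split <;> simp

-- sums over a nodup alphabet
lemma pvSum_ite (S : List Char) (hS : S.Nodup) (c : Char) (hc : c ∈ S) (f : Char → Int) :
    (S.map fun y => if y = c then f y else 0).sum = f c := by
  induction S with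
  | nil => cases hc
  | cons a t ih =>
    rcases List.nodup_cons.mp hS with ⟨ha, ht⟩
    by_cases hac : a = c
    · subst hac
      have hz : (t.map fun y => if y = a then f y else 0).sum = 0 := by
        apply List.sum_eq_zero
        intro z hz
        rcases List.mem_map.mp hz with ⟨y, hy, rfl⟩
        have : y ≠ a := fun h => ha (h ▸ hy)
        simp [this]
      simp [hz]
    · have hc' : c ∈ t := by
        rcases List.mem_cons.mp hc with h | h
        · exact absurd h.symm hac
        · exact h
      simp [hac, ih ht hc']

lemma pvSum_extend (S K : List Char) (f : Char → Int) (hS : S.Nodup) (hK : K.Nodup)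
    (hsub : ∀ y ∈ K, y ∈ S) (hz : ∀ y, y ∉ K → f y = 0) :
    (K.map f).sum = (S.map f).sum := by
  rw [← List.sum_toFinset f hK, ← List.sum_toFinset f hS]
  apply Finset.sum_subset
  · intro y hy
    exact List.mem_toFinset.mpr (hsub y (List.mem_toFinset.mp hy))
  · intro y _ hy
    exact hz y (fun h => hy (List.mem_toFinset.mpr h))

lemma pvG_snoc (S : List Char) (hS : S.Nodup) (p : List Char) (c : Char) (hc : c ∈ S) :
    pvG S (p ++ [c]) = pvG S p + pvT3 S p c := by
  unfold pvG
  have h : (S.map fun x => (S.map fun y => pvPat x y (p ++ [c])).sum) =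
      S.map fun x => (S.map fun y => pvPat x y p).sum + (if x = c then pvT3 S p x else 0) := by
    apply List.map_congr_left
    intro x _
    have h2 : (S.map fun y => pvPat x y (p ++ [c])) =
        S.map fun y => pvPat x y p + (if c = x then pvC3 p x y else 0) := by
      apply List.map_congr_left
      intro y _
      rw [pvPat_snoc]
    rw [h2, PySem.List.sum_map_add_int]
    by_cases h : x = c
    · subst h; simp [pvT3]
    · have h' : c ≠ x := fun hh => h hh.symm
      simp [h, h']
  rw [h, PySem.List.sum_map_add_int, pvSum_ite S hS c hc]

-- the value the generic items-fold reads for key x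
def pvWlook {α : Type} (w : α → Int) (l : List (Char × α)) (x : Char) : Int :=
  ((l.find? (fun p => p.1 == x)).map (fun p => w p.2)).getD 0

lemma pvWlook_nil {α : Type} (w : α → Int) (x : Char) : pvWlook w [] x = 0 := rfl

lemma pvWlook_cons_self {α : Type} (w : α → Int) (k : Char) (v : α) (t : List (Char × α)) :
    pvWlook w ((k, v) :: t) k = w v := by
  simp [pvWlook]

lemma pvWlook_cons_ne {α : Type} (w : α → Int) (k x : Char) (hne : k ≠ x) (v : α)
    (t : List (Char × α)) : pvWlook w ((k, v) :: t) x = pvWlook w t x := by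
  simp [pvWlook, hne]

lemma pvWlook_eq_zero_of_not_mem {α : Type} (w : α → Int) (l : List (Char × α)) (x : Char)
    (hx : x ∉ l.map Prod.fst) : pvWlook w l x = 0 := by
  induction l with
  | nil => rfl
  | cons kv t ih =>
    rcases kv with ⟨k, v⟩
    simp only [List.map_cons, List.mem_cons] at hx
    push_neg at hx
    rw [pvWlook_cons_ne w k x (fun h => hx.1 h.symm) v t]
    exact ih hx.2

-- `pvWlook` over a dict's items is getD of the dict
lemma pvWlook_items_snd (d : PySem.Dict Char Int) (x : Char) :
    pvWlook (fun v => v) d.items x = d.getD x 0 := by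
  unfold pvWlook PySem.Dict.getD PySem.Dict.get?
  cases h : d.items.find? (fun p => p.1 == x) <;> simp [h]

lemma pvWlook_items_inner (d : PySem.Dict Char (PySem.Dict Char Int)) (c x : Char) :
    pvWlook (fun v => v.getD c 0) d.items x = (d.getD x PySem.Dict.empty).getD c 0 := by
  unfold pvWlook
  cases h : d.items.find? (fun p => p.1 == x) with
  | none =>
    simp [h, PySem.Dict.getD, PySem.Dict.get?, PySem.Dict.empty]
  | some kv =>
    simp [h, PySem.Dict.getD, PySem.Dict.get?]

-- THE generic items-fold lemma: folding `d[kb.1][c] += w kb.2` over an assoc list with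
-- distinct keys adds pvWlook at (x, c) pointwise, extends inner key sets by c exactly on
-- the listed keys, and preserves Nodup of all inner key lists.
lemma pvFoldW {α : Type} (c : Char) (w : α → Int) :
    ∀ (l : List (Char × α)) (d : PySem.Dict Char (PySem.Dict Char Int)),
    (l.map Prod.fst).Nodup →
    (∀ x, (d.getD x PySem.Dict.empty).keys.Nodup) →
    (∀ x y,
      ((l.foldl (fun d kb => d.insert kb.1 (pvDAdd (d.getD kb.1 PySem.Dict.empty) c (w kb.2))) d).getD
          x PySem.Dict.empty).getD y 0
        = (d.getD x PySem.Dict.empty).getD y 0 + (if y = c then pvWlook w l x else 0)) ∧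
    (∀ x y,
      y ∈ ((l.foldl (fun d kb => d.insert kb.1 (pvDAdd (d.getD kb.1 PySem.Dict.empty) c (w kb.2))) d).getD
          x PySem.Dict.empty).keys
        ↔ y ∈ (d.getD x PySem.Dict.empty).keys ∨ (y = c ∧ x ∈ l.map Prod.fst)) ∧
    (∀ x,
      ((l.foldl (fun d kb => d.insert kb.1 (pvDAdd (d.getD kb.1 PySem.Dict.empty) c (w kb.2))) d).getD
          x PySem.Dict.empty).keys.Nodup) := by
  intro l
  induction l with
  | nil =>
    intro d _ hn
    refine ⟨fun x y => by simp [pvWlook_nil], fun x y => by simp, fun x => hn x⟩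
  | cons kb t ih =>
    intro d hnd hn
    rcases kb with ⟨k, v⟩
    simp only [List.map_cons, List.nodup_cons] at hnd
    set d' := d.insert k (pvDAdd (d.getD k PySem.Dict.empty) c (w v)) with hd'
    have hgd' : ∀ x, d'.getD x PySem.Dict.empty =
        if x = k then pvDAdd (d.getD k PySem.Dict.empty) c (w v) else d.getD x PySem.Dict.empty := by
      intro x; rw [hd', PySem.Dict.getD_insert]
    have hn' : ∀ x, (d'.getD x PySem.Dict.empty).keys.Nodup := by
      intro x
      rw [hgd']
      by_cases hx : x = k
      · simpa [hx, pvDAdd] using PySem.Dict.nodup_keys_insert _ _ _ (hn k)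
      · simpa [hx] using hn x
    obtain ⟨ihv, ihk, ihn⟩ := ih d' hnd.2 hn'
    refine ⟨?_, ?_, ?_⟩
    · intro x y
      rw [List.foldl_cons, ihv x y, hgd']
      by_cases hx : x = k
      · subst hx
        rw [pvWlook_cons_self, pvWlook_eq_zero_of_not_mem w t x hnd.1]
        simp only [if_pos rfl, pvDAdd, if_true]
        rw [PySem.Dict.getD_insert]
        by_cases hy : y = c
        · simp [hy]
        · simp [hy]
      · rw [pvWlook_cons_ne w k x (fun h => hx h.symm) v t]
        simp [hx]
    · intro x y
      rw [List.foldl_cons, ihk x y, hgd']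
      by_cases hx : x = k
      · subst hx
        simp only [if_pos rfl, pvDAdd, List.map_cons, List.mem_cons]
        constructor
        · rintro (h | h)
          · rcases (PySem.Dict.mem_keys_insert _ _ _ _).mp h with h | h
            · exact Or.inr ⟨h, Or.inl (by trivial)⟩
            · exact Or.inl h
          · exact Or.inr ⟨h.1, Or.inl (by trivial)⟩
        · rintro (h | h)
          · exact Or.inl ((PySem.Dict.mem_keys_insert _ _ _ _).mpr (Or.inr h))
          · exact Or.inl ((PySem.Dict.mem_keys_insert _ _ _ _).mpr (Or.inl h.1))
      · simp only [if_neg hx, List.map_cons, List.mem_cons]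
        constructor
        · rintro (h | h)
          · exact Or.inl h
          · exact Or.inr ⟨h.1, Or.inr h.2⟩
        · rintro (h | h)
          · exact Or.inl h
          · rcases h.2 with h2 | h2
            · exact absurd h2 hx
            · exact Or.inr ⟨h.1, h2⟩
    · intro x
      rw [List.foldl_cons]
      exact ihn x

-- facts about A's d1
lemma pvD1_snoc (p : List Char) (c : Char) : pvD1 (p ++ [c]) = pvDAdd (pvD1 p) c 1 := by
  unfold pvD1 pvDAdd
  rw [List.foldl_append, List.foldl_cons, List.foldl_nil]

lemma pvD1_getD (p : List Char) (x : Char) : (pvD1 p).getD x 0 = (p.count x : Int) := by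
  unfold pvD1
  rw [PySem.Dict.getD_foldl_insert_add_one]
  simp

lemma pvD1_keys (p : List Char) : (pvD1 p).keys = PySem.Set.ofList p := by
  unfold pvD1
  rw [PySem.Dict.keys_foldl_insert, PySem.Set.ofList_eq_foldl]
  simp [PySem.Set.update, PySem.Dict.keys_empty]

lemma pvD1_keys_nodup (p : List Char) : (pvD1 p).keys.Nodup := by
  rw [pvD1_keys]; exact PySem.Set.nodup_ofList p

-- A's loop invariant for (d2, d3) after prefix p, relative to the fixed alphabet S
def pvInv (S p : List Char) (d2 d3 : PySem.Dict Char (PySem.Dict Char Int)) : Prop :=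
  (∀ x y, (d2.getD x PySem.Dict.empty).getD y 0 = pvC2 p x y) ∧
  (∀ x, x ∉ d2.keys → ∀ y, pvC2 p x y = 0) ∧
  d2.keys.Nodup ∧
  (∀ x, (d2.getD x PySem.Dict.empty).keys.Nodup) ∧
  (∀ x y, (d3.getD x PySem.Dict.empty).getD y 0 = pvC3 p x y) ∧
  (∀ x y, y ∉ (d3.getD x PySem.Dict.empty).keys → pvC3 p x y = 0) ∧
  (∀ x y, y ∈ (d3.getD x PySem.Dict.empty).keys → y ∈ S) ∧
  (∀ x, (d3.getD x PySem.Dict.empty).keys.Nodup)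

lemma pvInv_init (S : List Char) : pvInv S [] PySem.Dict.empty PySem.Dict.empty := by
  refine ⟨?_, ?_, ?_, ?_, ?_, ?_, ?_, ?_⟩ <;>
    simp [PySem.Dict.getD_empty, PySem.Dict.keys_empty, pvC2, pvC3]

-- what A adds to `tuples` at character c: the values-sum of d3[c] is pvT3
lemma pvSum_values (S p : List Char) (hS : S.Nodup) (d2 d3 : PySem.Dict Char (PySem.Dict Char Int))
    (h : pvInv S p d2 d3) (c : Char) :
    ((d3.getD c PySem.Dict.empty).values).sum = pvT3 S p c := by
  obtain ⟨-, -, -, -, h3v, h3k, h3s, h3n⟩ := h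
  rw [PySem.Dict.values_eq_map_keys _ (h3n c) 0]
  have h1 : ((d3.getD c PySem.Dict.empty).keys.map fun k => (d3.getD c PySem.Dict.empty).getD k 0)
      = (d3.getD c PySem.Dict.empty).keys.map fun k => pvC3 p c k := by
    apply List.map_congr_left
    intro y _
    exact h3v c y
  rw [h1]
  exact pvSum_extend S _ _ hS (h3n c) (h3s c) (h3k c)

-- invariant preservation through the two items-folds of one iteration of A's loop
lemma pvInv_step (S p : List Char) (d2 d3 : PySem.Dict Char (PySem.Dict Char Int)) (c : Char)
    (hc : c ∈ S) (hp : ∀ ch ∈ p, ch ∈ S) (h : pvInv S p d2 d3) :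
    pvInv S (p ++ [c])
      ((pvD1 p).items.foldl
        (fun d kv => d.insert kv.1 (pvDAdd (d.getD kv.1 PySem.Dict.empty) c kv.2)) d2)
      (d2.items.foldl
        (fun d kd => d.insert kd.1 (pvDAdd (d.getD kd.1 PySem.Dict.empty) c (kd.2.getD c 0))) d3) := by
  obtain ⟨h2v, h2k, h2n, h2in, h3v, h3k, h3s, h3n⟩ := h
  have h2items : (d2.items.map Prod.fst).Nodup := h2n
  have h1items : ((pvD1 p).items.map Prod.fst).Nodup := pvD1_keys_nodup p
  obtain ⟨f3v, f3m, f3n⟩ := pvFoldW c (fun v => v.getD c 0) d2.items d3 h2items h3n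
  obtain ⟨f2v, f2m, f2n⟩ := pvFoldW c (fun v => v) (pvD1 p).items d2 h1items h2in
  have hkeys2 :
      ((pvD1 p).items.foldl
        (fun d kv => d.insert kv.1 (pvDAdd (d.getD kv.1 PySem.Dict.empty) c kv.2)) d2).keys
        = PySem.Set.update d2.keys ((pvD1 p).items.map Prod.fst) :=
    PySem.Dict.keys_foldl_insert_key (pvD1 p).items Prod.fst
      (fun d kv => pvDAdd (d.getD kv.1 PySem.Dict.empty) c kv.2) d2
  refine ⟨?_, ?_, ?_, ?_, ?_, ?_, ?_, ?_⟩
  · -- d2 values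
    intro x y
    rw [f2v x y, pvWlook_items_snd, pvD1_getD, h2v, pvC2_snoc]
    by_cases hy : y = c
    · subst hy; simp
    · have hy' : ¬ c = y := fun hh => hy hh.symm
      simp [hy, hy']
  · -- d2 key coverage
    intro x hx y
    rw [hkeys2, PySem.Set.mem_update] at hx
    push_neg at hx
    have hx2 : x ∉ d2.keys := hx.1
    have hxp : x ∉ p := by
      intro hmem
      exact hx.2 (by
        have : (pvD1 p).items.map Prod.fst = (pvD1 p).keys := rfl
        rw [this, pvD1_keys]
        exact (PySem.Set.mem_ofList _ _).mpr hmem)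
    rw [pvC2_snoc, h2k x hx2 y, List.count_eq_zero.mpr hxp]
    simp
  · -- d2 keys Nodup
    exact PySem.Dict.nodup_keys_foldl_insert_key (pvD1 p).items Prod.fst
      (fun d kv => pvDAdd (d.getD kv.1 PySem.Dict.empty) c kv.2) d2 h2n
  · -- d2 inner keys Nodup
    exact f2n
  · -- d3 values
    intro x y
    rw [f3v x y, pvWlook_items_inner, h2v, h3v, pvC3_snoc]
    by_cases hy : y = c
    · subst hy; simp
    · have hy' : ¬ c = y := fun hh => hy hh.symm
      simp [hy, hy']
  · -- d3 key coverage
    intro x y hy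
    rw [f3m x y] at hy
    push_neg at hy
    rw [pvC3_snoc, h3k x y hy.1]
    by_cases hyc : y = c
    · have hx2' : x ∉ d2.keys := by
        have e : d2.keys = d2.items.map Prod.fst := rfl
        rw [e]; exact hy.2 hyc
      rw [h2k x hx2' y]
      simp
    · have hy' : ¬ c = y := fun hh => hyc hh.symm
      simp [hy']
  · -- d3 inner keys stay inside S
    intro x y hy
    rcases (f3m x y).mp hy with hmem | hmem
    · exact h3s x y hmem
    · exact hmem.1 ▸ hc
  · -- d3 inner keys Nodup
    exact f3n

-- the mod-absorption step: accumulating v % m then reducing at the end is reducing v itself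
lemma pvModAux (a v : Int) : (a + v % 1000000007 - v) % 1000000007 = a % 1000000007 := by
  have h : a + v % 1000000007 - v = a + 1000000007 * -(v / 1000000007) := by
    rw [Int.emod_def]; ring
  rw [h, Int.add_mul_emod_self_left]

-- the main induction over A's loop: the accumulated `tuples` equals B's grand total mod p
lemma pvMainA (S : List Char) (hS : S.Nodup) :
    ∀ (r p : List Char) (t : Int) (d2 d3 : PySem.Dict Char (PySem.Dict Char Int)),
    (∀ ch ∈ p ++ r, ch ∈ S) → pvInv S p d2 d3 →
    (r.foldl pvStepA (t, pvD1 p, d2, d3)).1 % 1000000007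
      = (t + pvG S (p ++ r) - pvG S p) % 1000000007 := by
  intro r
  induction r with
  | nil =>
    intro p t d2 d3 _ _
    simp
  | cons c r' ih =>
    intro p t d2 d3 hmem hinv
    have hc : c ∈ S := hmem c (by simp)
    have hp : ∀ ch ∈ p, ch ∈ S := fun ch h => hmem ch (by simp [h])
    have hstep : pvStepA (t, pvD1 p, d2, d3) c
        = (t + PySem.Int.mod ((d3.getD c PySem.Dict.empty).values).sum 1000000007,
           pvD1 (p ++ [c]),
           (pvD1 p).items.foldl
             (fun d kv => d.insert kv.1 (pvDAdd (d.getD kv.1 PySem.Dict.empty) c kv.2)) d2,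
           d2.items.foldl
             (fun d kd => d.insert kd.1 (pvDAdd (d.getD kd.1 PySem.Dict.empty) c (kd.2.getD c 0))) d3) := by
      rw [pvD1_snoc]
      rfl
    rw [List.foldl_cons, hstep]
    have hmem' : ∀ ch ∈ (p ++ [c]) ++ r', ch ∈ S := by
      intro ch h
      apply hmem
      simp only [List.append_assoc, List.singleton_append] at h
      exact h
    rw [ih (p ++ [c]) _ _ _ hmem' (pvInv_step S p d2 d3 c hc hp hinv)]
    rw [pvSum_values S p hS d2 d3 hinv c,
        PySem.Int.mod_eq_emod_of_pos (by norm_num),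
        List.append_assoc, List.singleton_append, pvG_snoc S hS p c hc]
    have halg : t + pvT3 S p c % 1000000007 + pvG S (p ++ c :: r') - (pvG S p + pvT3 S p c)
        = (t + pvG S (p ++ c :: r') - pvG S p) + pvT3 S p c % 1000000007 - pvT3 S p c := by
      ring
    rw [halg, pvModAux]

lemma pvG_nil (S : List Char) : pvG S [] = 0 := by
  have h : ∀ x y : Char, pvPat x y ([] : List Char) = 0 := fun _ _ => rfl
  simp [pvG, h]

-- ===== VERDICT (by name: the statement is the Claim_ definition above) =====
theorem shortPalindrome_spec : Claim_equal_shortPalindrome := by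
  unfold Claim_equal_shortPalindrome
  intro s _
  unfold Spec_shortPalindrome shortPalindrome shortPalindrome_alt
  simp only []
  set l := s.toList with hl
  set S := PySem.List.dedup l with hSdef
  have hSof : S = PySem.Set.ofList l := rfl
  have hS : S.Nodup := by rw [hSof]; exact PySem.Set.nodup_ofList l
  have hmem : ∀ ch ∈ ([] : List Char) ++ l, ch ∈ S := by
    intro ch h
    rw [hSof]
    exact (PySem.Set.mem_ofList _ _).mpr (by simpa using h)
  have hA := pvMainA S hS l [] 0 PySem.Dict.empty PySem.Dict.empty hmem (pvInv_init S)
  have hD1nil : pvD1 [] = PySem.Dict.empty := rfl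
  rw [hD1nil] at hA
  rw [PySem.Int.mod_eq_emod_of_pos (by norm_num), PySem.Int.mod_eq_emod_of_pos (by norm_num)]
  simp only [List.nil_append, pvG_nil, sub_zero, zero_add] at hA
  rw [hA]
  congr 1
  simp only [PySem.List.foldl_add]
  rw [zero_add]
  rfl
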